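-- pv_equiv track=rewrite | github.com/anthonruales/Course-Recommendation-System | backend/recommendation_engine.py | _determine_work_environment
-- ===== SOURCE A (Python) =====
-- from typing import List, Dict, Any, Optional, Tuple, Set
--
-- def _determine_work_environment(traits: List[str]) -> Set[str]:
--     """Determine user's preferred work environment from their traits"""
--     work_envs = set()
--
--     env_mapping = {
--         'office': ['Office-based', 'Remote-friendly', 'Organized'],
--         'field': ['Field-work', 'Outdoor-enthusiast', 'Adventurous', 'Active'],
--         'clinical': ['Clinical-setting', 'Patient-focused', 'Helping-others', 'Empathetic'],
--         'laboratory': ['Laboratory', 'Research-oriented', 'Detail-focused', 'Scientific-thinking'],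
--         'studio': ['Studio-work', 'Creative-expression', 'Artistic-passion', 'Visual-learner'],
--     }
--
--     for env, env_traits in env_mapping.items():
--         matches = [t for t in traits if t in env_traits]
--         if len(matches) >= 2:
--             work_envs.add(env)
--
--     return work_envs
-- ===== SOURCE B (Python) =====
-- from typing import List, Dict, Any, Optional, Tuple, Set
--
-- def _determine_work_environment(traits: List[str]) -> Set[str]:
--     """Determine user's preferred work environment from their traits"""
--     env_mapping = {
--         'office': ['Office-based', 'Remote-friendly', 'Organized'],
--         'field': ['Field-work', 'Outdoor-enthusiast', 'Adventurous', 'Active'],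
--         'clinical': ['Clinical-setting', 'Patient-focused', 'Helping-others', 'Empathetic'],
--         'laboratory': ['Laboratory', 'Research-oriented', 'Detail-focused', 'Scientific-thinking'],
--         'studio': ['Studio-work', 'Creative-expression', 'Artistic-passion', 'Visual-learner'],
--     }
--     # Inverted index: each trait belongs to exactly one environment.
--     trait_to_env = {t: env for env, ts in env_mapping.items() for t in ts}
--     counts = {}
--     for t in traits:
--         env = trait_to_env.get(t)
--         if env is not None:
--             counts[env] = counts.get(env, 0) + 1
--     return {env for env in env_mapping if counts.get(env, 0) >= 2}
-- ===== Notes on version B (the rewrite author's own statement) =====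
-- stated objective: faster
-- what changed: Replaced the five per-environment scans of traits (one list comprehension per env) by an inverted trait->env index built once from env_mapping plus a single counting pass over traits; envs with count >= 2 are then collected.
import Mathlib
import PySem

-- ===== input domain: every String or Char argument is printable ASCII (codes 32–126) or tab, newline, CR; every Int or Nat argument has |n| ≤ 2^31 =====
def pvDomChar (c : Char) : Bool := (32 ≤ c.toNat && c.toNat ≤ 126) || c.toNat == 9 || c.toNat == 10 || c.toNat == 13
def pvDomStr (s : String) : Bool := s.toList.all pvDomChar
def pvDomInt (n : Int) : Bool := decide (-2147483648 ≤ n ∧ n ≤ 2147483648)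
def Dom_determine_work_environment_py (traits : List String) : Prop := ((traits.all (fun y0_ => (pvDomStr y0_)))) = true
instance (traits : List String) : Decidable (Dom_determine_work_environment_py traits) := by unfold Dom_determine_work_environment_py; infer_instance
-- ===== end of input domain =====

-- B replaces A's five per-environment scans of `traits` by an inverted trait→env index and one counting pass; same result set.

-- the dict literal `env_mapping`, shared verbatim by both Pythons; it is only ever iterated, so a pair list is exact
def pvEnvMapping : List (String × List String) :=
  [("office", ["Office-based", "Remote-friendly", "Organized"]),
   ("field", ["Field-work", "Outdoor-enthusiast", "Adventurous", "Active"]),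
   ("clinical", ["Clinical-setting", "Patient-focused", "Helping-others", "Empathetic"]),
   ("laboratory", ["Laboratory", "Research-oriented", "Detail-focused", "Scientific-thinking"]),
   ("studio", ["Studio-work", "Creative-expression", "Artistic-passion", "Visual-learner"])]

-- ===== PORT A =====
def determine_work_environment_py (traits : List String) : List String :=
  pvEnvMapping.foldl
    (fun work_envs p =>
      let matched := traits.filter (fun t => p.2.contains t)
      if ((matched.length : Int) ≥ 2) then PySem.Set.add work_envs p.1 else work_envs)
    PySem.Set.empty

-- ===== PORT B =====
-- trait_to_env = {t: env for env, ts in env_mapping.items() for t in ts}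
def pvTraitToEnv : PySem.Dict String String :=
  pvEnvMapping.foldl (fun d p => p.2.foldl (fun d t => d.insert t p.1) d) PySem.Dict.empty

def determine_work_environment_py_alt (traits : List String) : List String :=
  let counts : PySem.Dict String Int :=
    traits.foldl
      (fun c t =>
        match pvTraitToEnv.get? t with
        | some env => c.insert env (c.getD env 0 + 1)
        | none => c)
      PySem.Dict.empty
  pvEnvMapping.foldl
    (fun s p => if counts.getD p.1 0 ≥ 2 then PySem.Set.add s p.1 else s)
    PySem.Set.empty

-- ===== PRECONDITION & SPEC =====
def Spec_determine_work_environment_py (traits : List String) (out : List String) : Prop := out = determine_work_environment_py_alt traits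
instance (traits : List String) (out : List String) : Decidable (Spec_determine_work_environment_py traits out) := by unfold Spec_determine_work_environment_py; infer_instance

-- ===== CLAIM (what is proved, stated in full; the proofs are below) =====
def Claim_equal_determine_work_environment_py : Prop := ∀ (traits : List String), Dom_determine_work_environment_py traits → Spec_determine_work_environment_py traits (determine_work_environment_py traits)

-- ===== LEMMAS AND PROOFS =====

theorem pvTraitToEnv_lit : pvTraitToEnv = PySem.Dict.mk
    [("Office-based", "office"), ("Remote-friendly", "office"), ("Organized", "office"),
     ("Field-work", "field"), ("Outdoor-enthusiast", "field"), ("Adventurous", "field"), ("Active", "field"),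
     ("Clinical-setting", "clinical"), ("Patient-focused", "clinical"), ("Helping-others", "clinical"), ("Empathetic", "clinical"),
     ("Laboratory", "laboratory"), ("Research-oriented", "laboratory"), ("Detail-focused", "laboratory"), ("Scientific-thinking", "laboratory"),
     ("Studio-work", "studio"), ("Creative-expression", "studio"), ("Artistic-passion", "studio"), ("Visual-learner", "studio")] := by
  decide

-- the counting loop of B: final count of `env` = number of traits the index sends to `env`
theorem pv_counts_getD (traits : List String) (c : PySem.Dict String Int) (env : String) :
    (traits.foldl
      (fun c t =>
        match pvTraitToEnv.get? t with
        | some e => c.insert e (c.getD e 0 + 1)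
        | none => c) c).getD env 0
    = c.getD env 0 + ((traits.filter (fun t => pvTraitToEnv.get? t == some env)).length : Int) := by
  induction traits generalizing c with
  | nil => simp [List.foldl]
  | cons t ts ih =>
    simp only [List.foldl, List.filter]
    cases h : pvTraitToEnv.get? t with
    | none => simp [ih]
    | some e =>
      rw [ih]
      rcases eq_or_ne e env with he | he
      · subst he
        simp [PySem.Dict.getD_insert_self]
        ring
      · have hb : (e == env) = false := by simp [he]
        simp [PySem.Dict.getD_insert, he.symm, hb]

theorem pv_lookup_office :
    (fun t => pvTraitToEnv.get? t == some "office")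
      = (fun t => (["Office-based", "Remote-friendly", "Organized"] : List String).contains t) := by
  funext t
  rw [pvTraitToEnv_lit]
  by_cases h0 : t = "Office-based"
  · subst h0; decide
  by_cases h1 : t = "Remote-friendly"
  · subst h1; decide
  by_cases h2 : t = "Organized"
  · subst h2; decide
  by_cases h3 : t = "Field-work"
  · subst h3; decide
  by_cases h4 : t = "Outdoor-enthusiast"
  · subst h4; decide
  by_cases h5 : t = "Adventurous"
  · subst h5; decide
  by_cases h6 : t = "Active"
  · subst h6; decide
  by_cases h7 : t = "Clinical-setting"
  · subst h7; decide
  by_cases h8 : t = "Patient-focused"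
  · subst h8; decide
  by_cases h9 : t = "Helping-others"
  · subst h9; decide
  by_cases h10 : t = "Empathetic"
  · subst h10; decide
  by_cases h11 : t = "Laboratory"
  · subst h11; decide
  by_cases h12 : t = "Research-oriented"
  · subst h12; decide
  by_cases h13 : t = "Detail-focused"
  · subst h13; decide
  by_cases h14 : t = "Scientific-thinking"
  · subst h14; decide
  by_cases h15 : t = "Studio-work"
  · subst h15; decide
  by_cases h16 : t = "Creative-expression"
  · subst h16; decide
  by_cases h17 : t = "Artistic-passion"
  · subst h17; decide
  by_cases h18 : t = "Visual-learner"
  · subst h18; decide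
  simp_all [PySem.Dict.get?, ne_comm]

theorem pv_lookup_field :
    (fun t => pvTraitToEnv.get? t == some "field")
      = (fun t => (["Field-work", "Outdoor-enthusiast", "Adventurous", "Active"] : List String).contains t) := by
  funext t
  rw [pvTraitToEnv_lit]
  by_cases h0 : t = "Office-based"
  · subst h0; decide
  by_cases h1 : t = "Remote-friendly"
  · subst h1; decide
  by_cases h2 : t = "Organized"
  · subst h2; decide
  by_cases h3 : t = "Field-work"
  · subst h3; decide
  by_cases h4 : t = "Outdoor-enthusiast"
  · subst h4; decide
  by_cases h5 : t = "Adventurous"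
  · subst h5; decide
  by_cases h6 : t = "Active"
  · subst h6; decide
  by_cases h7 : t = "Clinical-setting"
  · subst h7; decide
  by_cases h8 : t = "Patient-focused"
  · subst h8; decide
  by_cases h9 : t = "Helping-others"
  · subst h9; decide
  by_cases h10 : t = "Empathetic"
  · subst h10; decide
  by_cases h11 : t = "Laboratory"
  · subst h11; decide
  by_cases h12 : t = "Research-oriented"
  · subst h12; decide
  by_cases h13 : t = "Detail-focused"
  · subst h13; decide
  by_cases h14 : t = "Scientific-thinking"
  · subst h14; decide
  by_cases h15 : t = "Studio-work"
  · subst h15; decide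
  by_cases h16 : t = "Creative-expression"
  · subst h16; decide
  by_cases h17 : t = "Artistic-passion"
  · subst h17; decide
  by_cases h18 : t = "Visual-learner"
  · subst h18; decide
  simp_all [PySem.Dict.get?, ne_comm]

theorem pv_lookup_clinical :
    (fun t => pvTraitToEnv.get? t == some "clinical")
      = (fun t => (["Clinical-setting", "Patient-focused", "Helping-others", "Empathetic"] : List String).contains t) := by
  funext t
  rw [pvTraitToEnv_lit]
  by_cases h0 : t = "Office-based"
  · subst h0; decide
  by_cases h1 : t = "Remote-friendly"
  · subst h1; decide
  by_cases h2 : t = "Organized"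
  · subst h2; decide
  by_cases h3 : t = "Field-work"
  · subst h3; decide
  by_cases h4 : t = "Outdoor-enthusiast"
  · subst h4; decide
  by_cases h5 : t = "Adventurous"
  · subst h5; decide
  by_cases h6 : t = "Active"
  · subst h6; decide
  by_cases h7 : t = "Clinical-setting"
  · subst h7; decide
  by_cases h8 : t = "Patient-focused"
  · subst h8; decide
  by_cases h9 : t = "Helping-others"
  · subst h9; decide
  by_cases h10 : t = "Empathetic"
  · subst h10; decide
  by_cases h11 : t = "Laboratory"
  · subst h11; decide
  by_cases h12 : t = "Research-oriented"
  · subst h12; decide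
  by_cases h13 : t = "Detail-focused"
  · subst h13; decide
  by_cases h14 : t = "Scientific-thinking"
  · subst h14; decide
  by_cases h15 : t = "Studio-work"
  · subst h15; decide
  by_cases h16 : t = "Creative-expression"
  · subst h16; decide
  by_cases h17 : t = "Artistic-passion"
  · subst h17; decide
  by_cases h18 : t = "Visual-learner"
  · subst h18; decide
  simp_all [PySem.Dict.get?, ne_comm]

theorem pv_lookup_laboratory :
    (fun t => pvTraitToEnv.get? t == some "laboratory")
      = (fun t => (["Laboratory", "Research-oriented", "Detail-focused", "Scientific-thinking"] : List String).contains t) := by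
  funext t
  rw [pvTraitToEnv_lit]
  by_cases h0 : t = "Office-based"
  · subst h0; decide
  by_cases h1 : t = "Remote-friendly"
  · subst h1; decide
  by_cases h2 : t = "Organized"
  · subst h2; decide
  by_cases h3 : t = "Field-work"
  · subst h3; decide
  by_cases h4 : t = "Outdoor-enthusiast"
  · subst h4; decide
  by_cases h5 : t = "Adventurous"
  · subst h5; decide
  by_cases h6 : t = "Active"
  · subst h6; decide
  by_cases h7 : t = "Clinical-setting"
  · subst h7; decide
  by_cases h8 : t = "Patient-focused"
  · subst h8; decide
  by_cases h9 : t = "Helping-others"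
  · subst h9; decide
  by_cases h10 : t = "Empathetic"
  · subst h10; decide
  by_cases h11 : t = "Laboratory"
  · subst h11; decide
  by_cases h12 : t = "Research-oriented"
  · subst h12; decide
  by_cases h13 : t = "Detail-focused"
  · subst h13; decide
  by_cases h14 : t = "Scientific-thinking"
  · subst h14; decide
  by_cases h15 : t = "Studio-work"
  · subst h15; decide
  by_cases h16 : t = "Creative-expression"
  · subst h16; decide
  by_cases h17 : t = "Artistic-passion"
  · subst h17; decide
  by_cases h18 : t = "Visual-learner"
  · subst h18; decide
  simp_all [PySem.Dict.get?, ne_comm]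

theorem pv_lookup_studio :
    (fun t => pvTraitToEnv.get? t == some "studio")
      = (fun t => (["Studio-work", "Creative-expression", "Artistic-passion", "Visual-learner"] : List String).contains t) := by
  funext t
  rw [pvTraitToEnv_lit]
  by_cases h0 : t = "Office-based"
  · subst h0; decide
  by_cases h1 : t = "Remote-friendly"
  · subst h1; decide
  by_cases h2 : t = "Organized"
  · subst h2; decide
  by_cases h3 : t = "Field-work"
  · subst h3; decide
  by_cases h4 : t = "Outdoor-enthusiast"
  · subst h4; decide
  by_cases h5 : t = "Adventurous"
  · subst h5; decide
  by_cases h6 : t = "Active"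
  · subst h6; decide
  by_cases h7 : t = "Clinical-setting"
  · subst h7; decide
  by_cases h8 : t = "Patient-focused"
  · subst h8; decide
  by_cases h9 : t = "Helping-others"
  · subst h9; decide
  by_cases h10 : t = "Empathetic"
  · subst h10; decide
  by_cases h11 : t = "Laboratory"
  · subst h11; decide
  by_cases h12 : t = "Research-oriented"
  · subst h12; decide
  by_cases h13 : t = "Detail-focused"
  · subst h13; decide
  by_cases h14 : t = "Scientific-thinking"
  · subst h14; decide
  by_cases h15 : t = "Studio-work"
  · subst h15; decide
  by_cases h16 : t = "Creative-expression"
  · subst h16; decide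
  by_cases h17 : t = "Artistic-passion"
  · subst h17; decide
  by_cases h18 : t = "Visual-learner"
  · subst h18; decide
  simp_all [PySem.Dict.get?, ne_comm]

-- ===== VERDICT (by name: the statement is the Claim_ definition above) =====
theorem determine_work_environment_py_spec : Claim_equal_determine_work_environment_py := by
  intro traits _
  unfold Spec_determine_work_environment_py
  unfold determine_work_environment_py determine_work_environment_py_alt
  simp only [pvEnvMapping, List.foldl]
  rw [pv_counts_getD, pv_counts_getD, pv_counts_getD, pv_counts_getD, pv_counts_getD,
      pv_lookup_office, pv_lookup_field, pv_lookup_clinical, pv_lookup_laboratory, pv_lookup_studio]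
  simp [PySem.Dict.getD_empty]
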